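-- pv_equiv track=rewrite | github.com/riadath/automate_python | C.py | sort_rows
-- ===== SOURCE A (Python) =====
-- def sort_rows(matrix):
--     mat_size = len(matrix)
--     for i in range(0,mat_size - 1):
--         for j in range(0,mat_size - i - 1):
--             pos_J,pos_J1 = 100000,100000
--             for k in range(0,len(matrix[j])-1):
--                 if matrix[j][k] != 0:
--                     pos_J = k
--                     break
--             for k in range(0,len(matrix[j + 1])-1):
--                 if matrix[j + 1][k] != 0:
--                     pos_J1 = k
--                     break
--             if pos_J > pos_J1:
--                 matrix[j],matrix[j + 1] = matrix[j + 1],matrix[j]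
--     return matrix
-- ===== SOURCE B (Python) =====
-- def sort_rows(matrix):
--     # Same comparator A uses: index of the first nonzero entry among all but
--     # the row's last element (sentinel 100000 when there is none), but computed
--     # once per row and fed to a single stable sort instead of A's bubble sort.
--     def first_nonzero(row):
--         for k, x in enumerate(row[:-1]):
--             if x != 0:
--                 return k
--         return 100000
--     matrix[:] = sorted(matrix, key=first_nonzero)
--     return matrix
-- ===== Notes on version B (the rewrite author's own statement) =====
-- stated objective: faster
-- what changed: B computes A's per-row comparison key (index of the first nonzero among all but the row's last element, 100000 if none) once per row and does one stable sort, replacing A's bubble sort that rescans both rows on every adjacent comparison.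
import Mathlib
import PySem

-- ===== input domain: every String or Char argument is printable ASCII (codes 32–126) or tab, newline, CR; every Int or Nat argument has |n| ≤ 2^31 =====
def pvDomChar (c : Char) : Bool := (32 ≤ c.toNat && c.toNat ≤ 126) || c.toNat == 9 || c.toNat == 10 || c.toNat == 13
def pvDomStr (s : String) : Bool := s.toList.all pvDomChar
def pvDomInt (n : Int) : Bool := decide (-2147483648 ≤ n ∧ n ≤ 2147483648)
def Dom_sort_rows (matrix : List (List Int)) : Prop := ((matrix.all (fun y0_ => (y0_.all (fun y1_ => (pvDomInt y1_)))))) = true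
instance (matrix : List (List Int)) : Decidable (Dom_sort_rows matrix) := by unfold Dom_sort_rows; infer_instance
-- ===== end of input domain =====

-- B replaces A's bubble sort (which rescans both rows at every adjacent comparison) by one stable
-- sort over per-row precomputed keys (the key is the comparator A uses: index of the first nonzero
-- among all but the row's last element, 100000 if none); both Pythons sort the list in place — the
-- equivalence proved here is about the returned value.

-- ===== PORT A =====
-- inner 'for k in range(0, len(row)-1): if row[k] != 0: pos = k; break' loop (pos starts at 100000)
def pvScanAux (row : List Int) (k : Nat) : Nat :=
  if k + 1 < row.length then
    (if row.getD k 0 ≠ 0 then k else pvScanAux row (k + 1))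
  else 100000
termination_by row.length - k

-- body of the j-loop: compute pos_J, pos_J1, swap matrix[j] and matrix[j+1] if pos_J > pos_J1
def pvBody (m : List (List Int)) (j : Nat) : List (List Int) :=
  let posJ := pvScanAux (m.getD j []) 0
  let posJ1 := pvScanAux (m.getD (j + 1) []) 0
  if posJ > posJ1 then (m.set j (m.getD (j + 1) [])).set (j + 1) (m.getD j []) else m

-- 'for j in range(0, bound)' loop
def pvPassAux (m : List (List Int)) (j bound : Nat) : List (List Int) :=
  if j < bound then pvPassAux (pvBody m j) (j + 1) bound else m
termination_by bound - j

def sort_rows (matrix : List (List Int)) : List (List Int) :=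
  let mat_size := matrix.length
  (List.range (mat_size - 1)).foldl (fun m i => pvPassAux m 0 (mat_size - 1 - i)) matrix

-- ===== PORT B =====
-- 'for k, x in enumerate(row[:-1]): if x != 0: return k' / 'return 100000'  (row[:-1] = row.dropLast, exact)
def pvFNZ : List Int → Nat → Nat
  | [], _ => 100000
  | x :: t, k => if x ≠ 0 then k else pvFNZ t (k + 1)

def pvKey (row : List Int) : Nat := pvFNZ row.dropLast 0

def sort_rows_alt (matrix : List (List Int)) : List (List Int) :=
  PySem.List.sorted matrix (fun row => pvKey row) false

-- ===== PRECONDITION & SPEC =====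
def Spec_sort_rows (matrix : List (List Int)) (out : List (List Int)) : Prop := out = sort_rows_alt matrix
instance (matrix : List (List Int)) (out : List (List Int)) : Decidable (Spec_sort_rows matrix out) := by unfold Spec_sort_rows; infer_instance

-- ===== CLAIM (what is proved, stated in full; the proofs are below) =====
def Claim_equal_sort_rows : Prop := ∀ (matrix : List (List Int)), Dom_sort_rows matrix → Spec_sort_rows matrix (sort_rows matrix)

-- ===== LEMMAS AND PROOFS =====

-- A's inner scan equals B's key function
theorem pvScanAux_eq_pvFNZ (row : List Int) : ∀ k, pvScanAux row k = pvFNZ (row.dropLast.drop k) k := by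
  intro k
  induction k using pvScanAux.induct (row := row) with
  | case1 k h hz =>
    have hk : k < row.dropLast.length := by simp; omega
    have hdrop : row.dropLast.drop k = row.dropLast[k] :: row.dropLast.drop (k + 1) :=
      (List.drop_eq_getElem_cons hk)
    have hget : row.dropLast[k] = row[k]'(by omega) := List.getElem_dropLast hk
    have hgetD : row.getD k 0 = row[k]'(by omega) := List.getD_eq_getElem row 0 (by omega)
    rw [pvScanAux, if_pos h, if_pos hz, hdrop, pvFNZ, hget, ← hgetD, if_pos hz]
  | case2 k h hz ih =>
    have hk : k < row.dropLast.length := by simp; omega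
    have hdrop : row.dropLast.drop k = row.dropLast[k] :: row.dropLast.drop (k + 1) :=
      (List.drop_eq_getElem_cons hk)
    have hget : row.dropLast[k] = row[k]'(by omega) := List.getElem_dropLast hk
    have hgetD : row.getD k 0 = row[k]'(by omega) := List.getD_eq_getElem row 0 (by omega)
    rw [pvScanAux, if_pos h, if_neg hz, hdrop, pvFNZ, hget, ← hgetD, if_neg hz, ih]
  | case3 k h =>
    rw [pvScanAux, if_neg h]
    have : row.dropLast.drop k = [] := by
      apply List.drop_eq_nil_of_le
      simp; omega
    rw [this, pvFNZ]

def pvKeyA (row : List Int) : Nat := pvScanAux row 0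

-- one bounded bubble pass, structurally (key-generic), and the outer loop
def bpassN {α : Type} (key : α → Nat) : Nat → List α → List α
  | 0, l => l
  | _ + 1, [] => []
  | _ + 1, [x] => [x]
  | k + 1, x :: y :: t => if key y < key x then y :: bpassN key k (x :: t) else x :: bpassN key k (y :: t)

def gsort {α : Type} (key : α → Nat) : Nat → List α → List α
  | 0, m => m
  | c + 1, m => gsort key c (bpassN key (c + 1) m)


theorem bpassN_perm {α : Type} (key : α → Nat) : ∀ (k : Nat) (l : List α), (bpassN key k l).Perm l := by
  intro k l
  induction k, l using bpassN.induct (key := key) with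
  | case1 l => simp [bpassN]
  | case2 k => simp [bpassN]
  | case3 k x => simp [bpassN]
  | case4 k x y t h ih =>
    rw [bpassN, if_pos h]
    exact ((ih.cons y).trans (List.Perm.swap' x y (List.Perm.refl t)))
  | case5 k x y t h ih =>
    rw [bpassN, if_neg h]
    exact ih.cons x

theorem bpassN_append {α : Type} (key : α → Nat) : ∀ (k : Nat) (l s : List α), l.length = k + 1 →
    bpassN key k (l ++ s) = bpassN key k l ++ s := by
  intro k l
  induction k, l using bpassN.induct (key := key) with
  | case1 l => intro s h; match l, h with | [x], _ => rfl
  | case2 k => intro s h; simp at h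
  | case3 k x => intro s h; simp at h
  | case4 k x y t h ih =>
    intro s hl
    simp only [List.cons_append, bpassN, if_pos h]
    rw [← List.cons_append, ih s (by simpa using hl)]
  | case5 k x y t h ih =>
    intro s hl
    simp only [List.cons_append, bpassN, if_neg h]
    rw [← List.cons_append, ih s (by simpa using hl)]

theorem insertBy_comm {α : Type} (key : α → Nat) (x y : α) (h : key y < key x) :
    ∀ acc : List α, PySem.List.insertBy (fun a b => decide (key a < key b)) x
        (PySem.List.insertBy (fun a b => decide (key a < key b)) y acc)
      = PySem.List.insertBy (fun a b => decide (key a < key b)) y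
        (PySem.List.insertBy (fun a b => decide (key a < key b)) x acc) := by
  intro acc
  induction acc with
  | nil =>
    simp [PySem.List.insertBy, h, Nat.not_lt.2 (Nat.le_of_lt h)]
  | cons z zs ih =>
    by_cases hyz : key y < key z
    · have hxy : ¬ key x < key y := Nat.not_lt.2 (Nat.le_of_lt h)
      by_cases hxz : key x < key z
      · simp [PySem.List.insertBy, hyz, hxz, hxy, h]
      · simp [PySem.List.insertBy, hyz, hxz, hxy]
    · have hxz : ¬ key x < key z := by
        intro hx
        exact hyz (Nat.lt_trans h hx)
      simp [PySem.List.insertBy, hyz, hxz, ih]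

theorem foldl_ins_bpassN {α : Type} (key : α → Nat) : ∀ (k : Nat) (l : List α) (acc : List α),
    (bpassN key k l).foldl (fun acc x => PySem.List.insertBy (fun a b => decide (key a < key b)) x acc) acc
      = l.foldl (fun acc x => PySem.List.insertBy (fun a b => decide (key a < key b)) x acc) acc := by
  intro k l
  induction k, l using bpassN.induct (key := key) with
  | case1 l => intro acc; rfl
  | case2 k => intro acc; rfl
  | case3 k x => intro acc; rfl
  | case4 k x y t h ih =>
    intro acc
    rw [bpassN, if_pos h]
    simp only [List.foldl_cons]
    rw [ih, List.foldl_cons, insertBy_comm key x y h]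
  | case5 k x y t h ih =>
    intro acc
    rw [bpassN, if_neg h]
    simp only [List.foldl_cons]
    rw [ih, List.foldl_cons]

theorem sorted_bpassN {α : Type} (key : α → Nat) (k : Nat) (l : List α) :
    PySem.List.sorted (bpassN key k l) key false = PySem.List.sorted l key false := by
  rw [PySem.List.sorted_eq_foldl_insertBy, PySem.List.sorted_eq_foldl_insertBy]
  exact foldl_ins_bpassN key k l []

theorem sorted_append_foldl {α : Type} (key : α → Nat) (p s : List α) :
    PySem.List.sorted (p ++ s) key false
      = s.foldl (fun acc x => PySem.List.insertBy (fun a b => decide (key a < key b)) x acc)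
          (PySem.List.sorted p key false) := by
  rw [PySem.List.sorted_eq_foldl_insertBy, PySem.List.sorted_eq_foldl_insertBy, List.foldl_append]

theorem bpassN_last_max {α : Type} (key : α → Nat) : ∀ (k : Nat) (l : List α), l.length = k + 1 →
    ∃ q mx, bpassN key k l = q ++ [mx] ∧ ∀ x ∈ q, key x ≤ key mx := by
  intro k l
  induction k, l using bpassN.induct (key := key) with
  | case1 l =>
    intro h
    match l, h with
    | [x], _ => exact ⟨[], x, rfl, by simp⟩
  | case2 k => intro h; simp at h
  | case3 k x => intro h; simp at h
  | case4 k x y t h ih =>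
    intro hl
    obtain ⟨q, mx, heq, hle⟩ := ih (by simpa using hl)
    have hall : ∀ z ∈ q ++ [mx], key z ≤ key mx := by
      intro z hz
      rcases List.mem_append.1 hz with hz | hz
      · exact hle z hz
      · simp at hz; subst hz; exact Nat.le_refl _
    have hx : key x ≤ key mx := hall x (by rw [← heq]; exact ((bpassN_perm key k (x :: t)).mem_iff).2 (by simp))
    refine ⟨y :: q, mx, ?_, ?_⟩
    · rw [bpassN, if_pos h, heq]; rfl
    · intro z hz
      rcases List.mem_cons.1 hz with hz | hz
      · subst hz; exact Nat.le_trans (Nat.le_of_lt (by simpa using h)) hx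
      · exact hle z hz
  | case5 k x y t h ih =>
    intro hl
    obtain ⟨q, mx, heq, hle⟩ := ih (by simpa using hl)
    have hy : key y ≤ key mx := by
      have : y ∈ q ++ [mx] := by rw [← heq]; exact ((bpassN_perm key k (y :: t)).mem_iff).2 (by simp)
      rcases List.mem_append.1 this with hz | hz
      · exact hle y hz
      · simp at hz; subst hz; exact Nat.le_refl _
    refine ⟨x :: q, mx, ?_, ?_⟩
    · rw [bpassN, if_neg h, heq]; rfl
    · intro z hz
      rcases List.mem_cons.1 hz with hz | hz
      · subst hz; exact Nat.le_trans (Nat.le_of_not_lt (by simpa using h)) hy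
      · exact hle z hz

theorem gsort_eq {α : Type} (key : α → Nat) : ∀ (c : Nat) (p s : List α), p.length = c + 1 →
    PySem.List.sorted (p ++ s) key false = PySem.List.sorted p key false ++ s →
    gsort key c (p ++ s) = PySem.List.sorted (p ++ s) key false := by
  intro c
  induction c with
  | zero =>
    intro p s hp hs
    match p, hp with
    | [a], _ =>
      rw [hs]
      rfl
  | succ c ih =>
    intro p s hp hs
    obtain ⟨q, mx, heq, hle⟩ := bpassN_last_max key (c + 1) p hp
    have hrlen : (bpassN key (c + 1) p).length = p.length := (bpassN_perm key (c + 1) p).length_eq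
    have hqlen : q.length = c + 1 := by
      rw [heq] at hrlen; simp at hrlen; omega
    -- sorted r = sorted q ++ [mx]
    have hins : PySem.List.insertBy (fun a b => decide (key a < key b)) mx
        (PySem.List.sorted q key false) = PySem.List.sorted q key false ++ [mx] := by
      apply PySem.List.insertBy_of_forall_not_before
      intro y hy
      have : y ∈ q := (PySem.List.mem_sorted q key false y).1 hy
      simpa using Nat.not_lt.2 (hle y this)
    have hSq : PySem.List.sorted (bpassN key (c + 1) p) key false
        = PySem.List.sorted q key false ++ [mx] := by
      rw [heq, sorted_append_foldl]
      simpa using hins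
    have hSr : PySem.List.sorted (bpassN key (c + 1) p) key false
        = PySem.List.sorted p key false := sorted_bpassN key (c + 1) p
    -- hypothesis for the IH
    have hs2 : PySem.List.sorted (q ++ (mx :: s)) key false
        = PySem.List.sorted q key false ++ (mx :: s) := by
      have h1 : q ++ (mx :: s) = (q ++ [mx]) ++ s := by simp
      rw [h1, sorted_append_foldl, ← heq, hSr, ← sorted_append_foldl, hs, ← hSr, hSq]
      simp
    have hihs : PySem.List.sorted (q ++ (mx :: s)) key false
        = PySem.List.sorted (p ++ s) key false := by
      have h1 : q ++ (mx :: s) = (q ++ [mx]) ++ s := by simp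
      rw [h1, sorted_append_foldl, ← heq, hSr, ← sorted_append_foldl]
    have hih := ih q (mx :: s) hqlen hs2
    show gsort key c (bpassN key (c + 1) (p ++ s)) = _
    rw [bpassN_append key (c + 1) p s hp, heq]
    have h2 : (q ++ [mx]) ++ s = q ++ (mx :: s) := by simp
    rw [h2, hih, hihs]

theorem getD_append_length {α : Type} [Inhabited α] : ∀ (u : List α) (a : α) (t : List α) (d : α),
    (u ++ a :: t).getD u.length d = a := by
  intro u a t d
  induction u with
  | nil => rfl
  | cons x u ih => simpa using ih

theorem set_append_length {α : Type} : ∀ (u : List α) (x : α) (s : List α) (y : α),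
    (u ++ x :: s).set u.length y = u ++ y :: s := by
  intro u x s y
  induction u with
  | nil => rfl
  | cons z u ih => simpa using ih

theorem passAux_eq : ∀ (k : Nat) (u : List (List Int)) (a : List Int) (t : List (List Int)),
    k ≤ t.length → pvPassAux (u ++ a :: t) u.length (u.length + k) = u ++ bpassN pvKeyA k (a :: t) := by
  intro k
  induction k with
  | zero =>
    intro u a t _
    rw [pvPassAux]
    simp [bpassN]
  | succ k ih =>
    intro u a t hk
    match t, hk with
    | b :: t', hk =>
      have hga : (u ++ a :: b :: t').getD u.length [] = a := getD_append_length u a (b :: t') []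
      have hgb : (u ++ a :: b :: t').getD (u.length + 1) [] = b := by
        have := getD_append_length (u ++ [a]) b t' []
        simpa using this
      rw [pvPassAux, if_pos (by omega)]
      rw [pvBody]
      simp only [hga, hgb]
      by_cases hswap : pvKeyA b < pvKeyA a
      · rw [if_pos (by exact hswap)]
        have hset : (((u ++ a :: b :: t').set u.length b).set (u.length + 1) a) = u ++ b :: a :: t' := by
          rw [set_append_length u a (b :: t') b]
          have := set_append_length (u ++ [b]) b t' a
          simpa using this
        rw [hset]
        have := ih (u ++ [b]) a t' (by simpa using hk)
        simp only [List.length_append, List.length_cons, List.length_nil] at this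
        have h2 : u.length + 1 + k = u.length + (k + 1) := by omega
        rw [h2] at this
        rw [show (u ++ [b]) ++ a :: t' = u ++ b :: a :: t' by simp] at this
        rw [this]
        rw [bpassN, if_pos hswap]
        simp
      · rw [if_neg (by exact hswap)]
        have := ih (u ++ [a]) b t' (by simpa using hk)
        simp only [List.length_append, List.length_cons, List.length_nil] at this
        have h2 : u.length + 1 + k = u.length + (k + 1) := by omega
        rw [h2] at this
        rw [show (u ++ [a]) ++ b :: t' = u ++ a :: b :: t' by simp] at this
        rw [this]
        rw [bpassN, if_neg hswap]
        simp

theorem foldl_pass_eq_gsort : ∀ (c : Nat) (m : List (List Int)), c < m.length →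
    (List.range c).foldl (fun acc i => pvPassAux acc 0 (c - i)) m = gsort pvKeyA c m := by
  intro c
  induction c with
  | zero => intro m _; rfl
  | succ c ih =>
    intro m hm
    rw [List.range_succ_eq_map]
    simp only [List.foldl_cons, List.foldl_map, Nat.sub_zero]
    have hfun : (fun (acc : List (List Int)) (i : Nat) => pvPassAux acc 0 (c + 1 - (i + 1)))
        = fun acc i => pvPassAux acc 0 (c - i) := by
      funext acc i
      congr 1
      omega
    match m, hm with
    | a :: t, hm =>
      have hpass : pvPassAux (a :: t) 0 (c + 1) = bpassN pvKeyA (c + 1) (a :: t) := by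
        have := passAux_eq (c + 1) [] a t (by simp at hm; omega)
        simpa using this
      have hlen : (bpassN pvKeyA (c + 1) (a :: t)).length = (a :: t).length :=
        (bpassN_perm pvKeyA (c + 1) (a :: t)).length_eq
      rw [hfun, ih _ (by rw [hpass, hlen]; simpa using Nat.lt_of_succ_lt hm), hpass]
      rfl

theorem key_eq : pvKeyA = pvKey := by
  funext row
  simpa using pvScanAux_eq_pvFNZ row 0

-- ===== VERDICT (by name: the statement is the Claim_ definition above) =====
theorem sort_rows_spec : Claim_equal_sort_rows := by
  intro matrix _
  unfold Spec_sort_rows sort_rows sort_rows_alt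
  rw [← key_eq]
  rcases hm : matrix with _ | ⟨a, t⟩
  · simp [PySem.List.sorted]
  · have h1 := foldl_pass_eq_gsort t.length (a :: t) (by simp)
    have h2 := gsort_eq pvKeyA t.length (a :: t) [] (by simp) (by simp)
    simp only [List.length_cons, Nat.add_sub_cancel]
    rw [h1]
    simpa using h2
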